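-- pv_equiv track=rewrite | github.com/proRamLOGO/Competetive_Programming | FEB20B/lc_itrust.py | searchh
-- ===== SOURCE A (Python) =====
-- DB = [5, 1, 5, 5, 1, 5, 6, 5, 1, 5, 5, 1, 5, 6, 5, 1, 5, 5, 1, 5, 6, 5, 1, 6, 5, 1, 5, 5, 1, 5, 6, 5, 1, 5, 5, 1, 5, 6, 5, 1, 5, 5, 1, 5, 6, 5, 1, 5, 1, 5, 1, 5, 5, 1, 5, 6, 5, 1, 5, 5, 1, 5, 6, 5, 1, 5, 5, 1, 5, 6, 5, 1, 5, 6, 1, 5, 5, 1, 5, 6, 5, 1, 5, 5, 1, 5, 6, 5, 1, 5, 5, 1, 5, 6, 5, 1, 5, 5, 1, 5, 6]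
--
-- def searchh( x, e ):
--     if x <= 3 :
--         return -1
--     if x <= 9 :
--         return 0
--
--     # sum = 400
--     # len = 101
--
--     x -= 9
--     t = x//400
--     rem = x%400
--     t *= 101
--     s = 0
--     i = 0
--     while ( i < 101 and s < rem ) :
--         s += DB[i]
--         i += 1
--     if (e) :
--         if ( s > rem ) :
--             i -= 1
--     return t+i
-- ===== SOURCE B (Python) =====
-- DB = [5, 1, 5, 5, 1, 5, 6, 5, 1, 5, 5, 1, 5, 6, 5, 1, 5, 5, 1, 5, 6, 5, 1, 6, 5, 1, 5, 5, 1, 5, 6, 5, 1, 5, 5, 1, 5, 6, 5, 1, 5, 5, 1, 5, 6, 5, 1, 5, 1, 5, 1, 5, 5, 1, 5, 6, 5, 1, 5, 5, 1, 5, 6, 5, 1, 5, 5, 1, 5, 6, 5, 1, 5, 6, 1, 5, 5, 1, 5, 6, 5, 1, 5, 5, 1, 5, 6, 5, 1, 5, 5, 1, 5, 6, 5, 1, 5, 5, 1, 5, 6]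
--
-- # prefix sums: P[k] = sum(DB[:k]); P[0] = 0 ... P[101] = 400; strictly increasing
-- P = [0]
-- _s = 0
-- for _d in DB:
--     _s += _d
--     P.append(_s)
--
-- def searchh(x, e):
--     if x <= 3:
--         return -1
--     if x <= 9:
--         return 0
--     x -= 9
--     t = (x // 400) * 101
--     rem = x % 400
--     # binary search: smallest lo in [0, 101] with P[lo] >= rem
--     lo, hi = 0, 101
--     while lo < hi:
--         mid = (lo + hi) // 2
--         if P[mid] < rem:
--             lo = mid + 1
--         else:
--             hi = mid
--     if e and P[lo] > rem:
--         lo -= 1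
--     return t + lo
-- ===== Notes on version B (the rewrite author's own statement) =====
-- stated objective: alternative
-- what changed: B precomputes a prefix-sum table of DB once at module level and finds the index with a binary search over that table, instead of A's per-call accumulate-and-compare linear scan of DB; guards and the cycle arithmetic are unchanged.
import Mathlib
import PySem

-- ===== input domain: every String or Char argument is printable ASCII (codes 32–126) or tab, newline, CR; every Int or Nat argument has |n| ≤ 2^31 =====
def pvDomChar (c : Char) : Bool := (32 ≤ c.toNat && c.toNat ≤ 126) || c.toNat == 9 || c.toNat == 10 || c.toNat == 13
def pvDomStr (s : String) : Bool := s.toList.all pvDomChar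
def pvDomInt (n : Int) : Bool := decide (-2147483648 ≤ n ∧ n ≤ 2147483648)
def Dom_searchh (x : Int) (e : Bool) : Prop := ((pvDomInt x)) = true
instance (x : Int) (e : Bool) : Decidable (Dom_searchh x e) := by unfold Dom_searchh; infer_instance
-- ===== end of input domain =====

-- B replaces A's linear accumulate-and-compare scan of DB with a precomputed prefix-sum
-- table and a hand-written binary search for the smallest index whose prefix sum reaches rem.

-- ===== PORT A =====
def DBL : List Int := [5, 1, 5, 5, 1, 5, 6, 5, 1, 5, 5, 1, 5, 6, 5, 1, 5, 5, 1, 5, 6, 5, 1, 6, 5, 1, 5, 5, 1, 5, 6, 5, 1, 5, 5, 1, 5, 6, 5, 1, 5, 5, 1, 5, 6, 5, 1, 5, 1, 5, 1, 5, 5, 1, 5, 6, 5, 1, 5, 5, 1, 5, 6, 5, 1, 5, 5, 1, 5, 6, 5, 1, 5, 6, 1, 5, 5, 1, 5, 6, 5, 1, 5, 5, 1, 5, 6, 5, 1, 5, 5, 1, 5, 6, 5, 1, 5, 5, 1, 5, 6]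

-- A's while loop (fuel 101 mirrors the loop bound i < 101, so the fuel is never exhausted;
-- DB[i] is ported via pyGetD — the guard i < 101 keeps the index in range, exact).
def searchhLoop (rem : Int) (s i : Int) : Nat → Int × Int
  | 0 => (s, i)
  | f + 1 =>
    if i < 101 ∧ s < rem then
      searchhLoop rem (s + PySem.List.pyGetD DBL i 0) (i + 1) f
    else (s, i)

def searchh (x : Int) (e : Bool) : Int :=
  if x ≤ 3 then -1
  else if x ≤ 9 then 0
  else
    let x' := x - 9
    let t := PySem.Int.floordiv x' 400
    let rem := PySem.Int.mod x' 400
    let t' := t * 101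
    let p := searchhLoop rem 0 0 101
    let i := if e then (if p.1 > rem then p.2 - 1 else p.2) else p.2
    t' + i

-- ===== PORT B =====
-- module-level prefix-sum table: P = [0]; for d in DB: s += d; P.append(s)
def PP : List Int :=
  (DBL.foldl (fun (acc : List Int × Int) d => (acc.1 ++ [acc.2 + d], acc.2 + d)) ([0], 0)).1

-- B's while loop (binary search; fuel 101 is ample — hi - lo starts at 101 and shrinks;
-- P[mid]/P[lo] ported via pyGetD, indices stay in [0, 101], exact).
def bsLoop (rem : Int) (lo hi : Int) : Nat → Int
  | 0 => lo
  | f + 1 =>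
    if lo < hi then
      let mid := PySem.Int.floordiv (lo + hi) 2
      if PySem.List.pyGetD PP mid 0 < rem then bsLoop rem (mid + 1) hi f
      else bsLoop rem lo mid f
    else lo

def searchh_alt (x : Int) (e : Bool) : Int :=
  if x ≤ 3 then -1
  else if x ≤ 9 then 0
  else
    let x' := x - 9
    let t := PySem.Int.floordiv x' 400 * 101
    let rem := PySem.Int.mod x' 400
    let lo := bsLoop rem 0 101 101
    let lo' := if e && decide (PySem.List.pyGetD PP lo 0 > rem) then lo - 1 else lo
    t + lo'

-- ===== PRECONDITION & SPEC =====
def Spec_searchh (x : Int) (e : Bool) (out : Int) : Prop := out = searchh_alt x e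
instance (x : Int) (e : Bool) (out : Int) : Decidable (Spec_searchh x e out) := by unfold Spec_searchh; infer_instance

-- ===== CLAIM (what is proved, stated in full; the proofs are below) =====
def Claim_equal_searchh : Prop := ∀ (x : Int) (e : Bool), Dom_searchh x e → Spec_searchh x e (searchh x e)

-- ===== LEMMAS AND PROOFS =====

-- For every remainder 0 ≤ r < 400, A's scan ends at exactly the index B's binary search
-- finds, with the accumulated sum equal to the prefix-sum table entry at that index.
set_option maxRecDepth 40000 in
theorem loop_eq_bs : ∀ r : Fin 400,
    searchhLoop (r : Int) 0 0 101 =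
      (PySem.List.pyGetD PP (bsLoop (r : Int) 0 101 101) 0, bsLoop (r : Int) 0 101 101) := by
  decide

-- ===== VERDICT (by name: the statement is the Claim_ definition above) =====
theorem searchh_spec : Claim_equal_searchh := by
  intro x e _
  unfold Spec_searchh searchh searchh_alt
  by_cases h3 : x ≤ 3
  · simp [h3]
  · by_cases h9 : x ≤ 9
    · simp [h3, h9]
    · simp only [h3, h9, if_false]
      have h0 : 0 ≤ PySem.Int.mod (x - 9) 400 := PySem.Int.mod_nonneg _ (by norm_num)
      have h1 : PySem.Int.mod (x - 9) 400 < 400 := PySem.Int.mod_lt _ (by norm_num)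
      have hk := loop_eq_bs ⟨(PySem.Int.mod (x - 9) 400).toNat, by omega⟩
      simp only [Int.toNat_of_nonneg h0] at hk
      rw [hk]
      cases e <;> simp
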